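-- pv_equiv track=rewrite | github.com/SindriTh/Forritun | document_retrieval.py | createwordlist
-- ===== SOURCE A (Python) =====
-- def createwordlist(fileobj):
--     ''' This function creates a list of strings where each string is a document '''
--     doclist = []
--     substring = ""
--     for line in fileobj:
--         if line == "<NEW DOCUMENT>\n":
--             doclist.append(substring)
--             substring = ""
--         else:
--             substring += line
--     doclist.append(substring)
--     return doclist
-- ===== SOURCE B (Python) =====
-- def createwordlist(fileobj):
--     ''' This function creates a list of strings where each string is a document '''
--     lines = list(fileobj)
--     idxs = [i for i, l in enumerate(lines) if l == "<NEW DOCUMENT>\n"]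
--     docs = []
--     start = 0
--     for i in idxs:
--         docs.append("".join(lines[start:i]))
--         start = i + 1
--     docs.append("".join(lines[start:]))
--     return docs
-- ===== Notes on version B (the rewrite author's own statement) =====
-- stated objective: alternative
-- what changed: Replaces A's single accumulating pass (growing a substring line by line) with an index-build pass that collects delimiter positions followed by a boundary walk that joins whole slices between consecutive delimiters.
import Mathlib
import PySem

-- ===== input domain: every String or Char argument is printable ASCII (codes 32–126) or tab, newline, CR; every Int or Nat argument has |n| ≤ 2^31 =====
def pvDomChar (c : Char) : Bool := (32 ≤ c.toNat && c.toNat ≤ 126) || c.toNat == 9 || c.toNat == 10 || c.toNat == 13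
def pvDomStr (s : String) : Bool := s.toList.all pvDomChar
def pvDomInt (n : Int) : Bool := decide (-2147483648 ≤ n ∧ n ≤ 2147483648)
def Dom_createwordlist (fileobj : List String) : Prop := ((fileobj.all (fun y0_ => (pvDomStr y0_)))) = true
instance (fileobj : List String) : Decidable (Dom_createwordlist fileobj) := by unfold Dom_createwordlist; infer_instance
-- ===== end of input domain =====

-- B replaces A's single accumulating pass by a delimiter-index pass plus a slice-joining boundary walk (alternative decomposition, same cost).

-- ===== PORT A =====
-- the for-loop of A, carrying (doclist, substring); after the loop the final substring is appended
def cwlLoopA (doclist : List String) (substring : String) : List String → List String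
  | [] => doclist ++ [substring]
  | line :: rest =>
    if line = "<NEW DOCUMENT>\n" then cwlLoopA (doclist ++ [substring]) "" rest
    else cwlLoopA doclist (substring ++ line) rest

def createwordlist (fileobj : List String) : List String :=
  cwlLoopA [] "" fileobj

-- ===== PORT B =====
-- the for-loop of B over the delimiter indices, carrying the start cursor; the trailing segment is appended at the end
def cwlLoopB (lines : List String) (start : Nat) : List Nat → List String
  | [] => [String.join (lines.drop start)]
  | i :: rest => String.join ((lines.drop start).take (i - start)) :: cwlLoopB lines (i + 1) rest

def createwordlist_alt (fileobj : List String) : List String :=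
  let lines := fileobj
  let idxs := ((lines.zipIdx).filter (fun p => p.1 = "<NEW DOCUMENT>\n")).map (·.2)
  cwlLoopB lines 0 idxs

-- ===== PRECONDITION & SPEC =====
def Spec_createwordlist (fileobj : List String) (out : List String) : Prop := out = createwordlist_alt fileobj
instance (fileobj : List String) (out : List String) : Decidable (Spec_createwordlist fileobj out) := by unfold Spec_createwordlist; infer_instance

-- ===== CLAIM (what is proved, stated in full; the proofs are below) =====
def Claim_equal_createwordlist : Prop := ∀ (fileobj : List String), Dom_createwordlist fileobj → Spec_createwordlist fileobj (createwordlist fileobj)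

-- ===== LEMMAS AND PROOFS =====

-- reference shape: documents of a line list, prepending non-delimiter lines onto the first document
def cwlRef : List String → List String
  | [] => [""]
  | l :: ls => if l = "<NEW DOCUMENT>\n" then "" :: cwlRef ls
               else (cwlRef ls).modifyHead (l ++ ·)

theorem cwlRef_ne_nil (ls : List String) : cwlRef ls ≠ [] := by
  induction ls with
  | nil => simp [cwlRef]
  | cons l ls ih =>
    simp only [cwlRef]
    split
    · simp
    · cases h : cwlRef ls with
      | nil => exact absurd h ih
      | cons d ds => simp [List.modifyHead]

theorem string_empty_append (s : String) : "" ++ s = s := by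
  apply String.ext; simp

theorem cwl_foldl_init (xs : List String) : ∀ s : String,
    xs.foldl (· ++ ·) s = s ++ xs.foldl (· ++ ·) "" := by
  induction xs with
  | nil => intro s; simp [List.foldl]
  | cons x xs ih =>
    intro s
    simp only [List.foldl]
    rw [ih (s ++ x), ih ("" ++ x), string_empty_append, String.append_assoc]

theorem cwl_join_cons (s : String) (xs : List String) :
    String.join (s :: xs) = s ++ String.join xs := by
  simp only [String.join, List.foldl]
  rw [cwl_foldl_init, string_empty_append]

-- A-side: the loop equals acc ++ (documents with sub prepended to the first)
theorem cwlLoopA_eq (ls : List String) : ∀ (acc : List String) (sub : String),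
    cwlLoopA acc sub ls = acc ++ (cwlRef ls).modifyHead (sub ++ ·) := by
  induction ls with
  | nil => intro acc sub; simp [cwlLoopA, cwlRef, List.modifyHead]
  | cons l ls ih =>
    intro acc sub
    simp only [cwlLoopA, cwlRef]
    split
    · rw [ih]
      cases h : cwlRef ls with
      | nil => exact absurd h (cwlRef_ne_nil ls)
      | cons d ds => simp [List.modifyHead]
    · rw [ih]
      cases h : cwlRef ls with
      | nil => exact absurd h (cwlRef_ne_nil ls)
      | cons d ds => simp [List.modifyHead, String.append_assoc]

theorem mem_zipIdx_ge (ls : List String) : ∀ (k : Nat) (p : String × Nat),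
    p ∈ ls.zipIdx k → k ≤ p.2 := by
  induction ls with
  | nil => intro k p h; simp [List.zipIdx] at h
  | cons l ls ih =>
    intro k p h
    rw [List.zipIdx_cons] at h
    rcases List.mem_cons.mp h with h | h
    · subst h; exact le_refl k
    · exact Nat.le_of_succ_le (ih (k+1) p h)

-- stepping the start cursor past a non-delimiter line prepends it to the first document
theorem cwlLoopB_step (full : List String) (l : String) (k : Nat)
    (hdrop : full.drop k = l :: full.drop (k+1)) (idxs : List Nat)
    (hge : ∀ i ∈ idxs, k + 1 ≤ i) :
    cwlLoopB full k idxs = (cwlLoopB full (k+1) idxs).modifyHead (l ++ ·) := by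
  cases idxs with
  | nil => simp [cwlLoopB, hdrop, cwl_join_cons, List.modifyHead]
  | cons i rest =>
    have hi : k + 1 ≤ i := hge i (List.mem_cons_self ..)
    have htake : (full.drop k).take (i - k) = l :: (full.drop (k+1)).take (i - (k+1)) := by
      rw [hdrop]
      have : i - k = (i - (k+1)) + 1 := by omega
      rw [this, List.take_succ_cons]
    simp [cwlLoopB, htake, cwl_join_cons, List.modifyHead]

-- B-side: the boundary walk from cursor k over the delimiter indices of the suffix equals cwlRef of the suffix
theorem cwlLoopB_eq (ls : List String) : ∀ (k : Nat) (full : List String),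
    full.drop k = ls →
    cwlLoopB full k (((ls.zipIdx k).filter (fun p => p.1 = "<NEW DOCUMENT>\n")).map (·.2)) = cwlRef ls := by
  induction ls with
  | nil => intro k full hdrop; simp [cwlLoopB, cwlRef, hdrop, String.join]
  | cons l ls ih =>
    intro k full hdrop
    have hdrop' : full.drop (k+1) = ls := by
      have h1 : full.drop (k+1) = (full.drop k).drop 1 := by
        rw [List.drop_drop]
      rw [h1, hdrop, List.drop_one, List.tail_cons]
    rw [List.zipIdx_cons]
    by_cases hl : l = "<NEW DOCUMENT>\n"
    · simp only [List.filter_cons, hl, decide_true, if_true, List.map_cons]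
      simp only [cwlLoopB, Nat.sub_self, List.take_zero, String.join]
      rw [ih (k+1) full hdrop']
      simp [cwlRef]
    · simp only [List.filter_cons, decide_eq_true_eq, hl, if_false]
      have hge : ∀ i ∈ ((ls.zipIdx (k+1)).filter (fun p => p.1 = "<NEW DOCUMENT>\n")).map (·.2), k + 1 ≤ i := by
        intro i hi
        rcases List.mem_map.mp hi with ⟨p, hp, hpe⟩
        subst hpe
        exact mem_zipIdx_ge ls (k+1) p (List.mem_of_mem_filter hp)
      rw [cwlLoopB_step full l k (by rw [hdrop, hdrop']) _ hge, ih (k+1) full hdrop']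
      simp [cwlRef, hl]

-- ===== VERDICT (by name: the statement is the Claim_ definition above) =====
theorem createwordlist_spec : Claim_equal_createwordlist := by
  intro fileobj _
  unfold Spec_createwordlist createwordlist createwordlist_alt
  rw [cwlLoopA_eq, cwlLoopB_eq fileobj 0 fileobj (by simp)]
  cases h : cwlRef fileobj with
  | nil => exact absurd h (cwlRef_ne_nil fileobj)
  | cons d ds => simp [List.modifyHead]
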